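-- pv_equiv track=rewrite | github.com/QuirkyCort/IoTy | public/extensions/ucsv.py | split_fields
-- ===== SOURCE A (Python) =====
-- def split_fields(data):
--     row = []
--     field = ''
--     quote = False
--     try:
--         for c in data:
--             if c == '"':
--                 quote = not quote
--                 field += c
--             elif c == ',' and not quote:
--                 row.append(field)
--                 field = ''
--             else:
--                 field += c
--         row.append(field)
--     except:
--         pass
--
--     return row
-- ===== SOURCE B (Python) =====
-- def split_fields(data):
--     try:
--         parts = data.split(',')
--     except:
--         return []
--     row = []
--     field = None
--     odd = False
--     for part in parts:
--         field = part if field is None else field + ',' + part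
--         odd ^= part.count('"') % 2 == 1
--         if odd:
--             continue
--         row.append(field)
--         field = None
--     if field is not None:
--         row.append(field)
--     return row
-- ===== Notes on version B (the rewrite author's own statement) =====
-- stated objective: faster
-- what changed: B replaces A's char-by-char state machine with one str.split pass on the comma separator that re-merges consecutive parts while the running double-quote count is odd.
import Mathlib
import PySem

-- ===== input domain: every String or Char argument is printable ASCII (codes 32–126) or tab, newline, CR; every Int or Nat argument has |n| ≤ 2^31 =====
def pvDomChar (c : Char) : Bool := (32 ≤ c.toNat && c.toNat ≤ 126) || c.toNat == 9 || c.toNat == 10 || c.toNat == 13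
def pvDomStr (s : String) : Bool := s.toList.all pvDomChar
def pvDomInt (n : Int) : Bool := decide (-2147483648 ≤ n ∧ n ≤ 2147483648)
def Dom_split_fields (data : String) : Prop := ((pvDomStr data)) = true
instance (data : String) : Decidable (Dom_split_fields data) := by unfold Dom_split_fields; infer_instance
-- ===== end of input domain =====

-- B does one str.split pass on the comma separator and re-merges parts by running quote parity instead of A's per-character state machine (faster in a timing run: the split runs in C).

-- ===== PORT A =====
-- state: (row, field, quote); the try/except never fires for a str input.
def aStep (st : List String × List Char × Bool) (c : Char) : List String × List Char × Bool :=
  let (row, field, quote) := st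
  if c = '"' then (row, field ++ [c], !quote)
  else if c = ',' ∧ quote = false then (row ++ [String.mk field], [], quote)
  else (row, field ++ [c], quote)

def split_fields (data : String) : List String :=
  let st := data.toList.foldl aStep ([], [], false)
  st.1 ++ [String.mk st.2.1]

-- ===== PORT B =====
-- hand port of data.split(',') for the single-char separator ',' (exact: Python's str.split keeps empty pieces, '' -> [''])
def pySplitComma : List Char → List (List Char)
  | [] => [[]]
  | c :: rest =>
    if c = ',' then [] :: pySplitComma rest
    else match pySplitComma rest with
      | [] => [[c]]
      | p :: ps => (c :: p) :: ps

-- Source B's for-loop over the parts, state (row, field, odd)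
def bLoop : List (List Char) → List String × Option (List Char) × Bool → List String × Option (List Char) × Bool
  | [], st => st
  | p :: ps, (row, field, odd) =>
    let field' := match field with | none => p | some f => f ++ ',' :: p
    let odd' := xor odd (p.count '"' % 2 == 1)
    if odd' then bLoop ps (row, some field', odd')
    else bLoop ps (row ++ [String.mk field'], none, odd')

def split_fields_alt (data : String) : List String :=
  let parts := pySplitComma data.toList
  let st := bLoop parts ([], none, false)
  match st.2.1 with
  | none => st.1
  | some f => st.1 ++ [String.mk f]

-- ===== PRECONDITION & SPEC =====
def Spec_split_fields (data : String) (out : List String) : Prop := out = split_fields_alt data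
instance (data : String) (out : List String) : Decidable (Spec_split_fields data out) := by unfold Spec_split_fields; infer_instance

-- ===== CLAIM (what is proved, stated in full; the proofs are below) =====
def Claim_equal_split_fields : Prop := ∀ (data : String), Dom_split_fields data → Spec_split_fields data (split_fields data)

-- ===== LEMMAS AND PROOFS =====

-- common middle spec: process parts with A-style state (row, field, quote)
def mGo : List (List Char) → List String → List Char → Bool → List String
  | [], row, field, _ => row ++ [String.mk field]
  | p :: ps, row, field, quote =>
    let field' := field ++ p
    let quote' := xor quote (p.count '"' % 2 == 1)
    match ps with
    | [] => row ++ [String.mk field']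
    | _ :: _ =>
      if quote' then mGo ps row (field' ++ [',']) quote'
      else mGo ps (row ++ [String.mk field']) [] false

def bPost (st : List String × Option (List Char) × Bool) : List String :=
  match st.2.1 with
  | none => st.1
  | some f => st.1 ++ [String.mk f]

def bRepr : Option (List Char) → List Char
  | none => []
  | some f => f ++ [',']

lemma pySplitComma_ne_nil (cs : List Char) : pySplitComma cs ≠ [] := by
  cases cs with
  | nil => simp [pySplitComma]
  | cons c rest =>
    simp only [pySplitComma]
    split
    · simp
    · cases h : pySplitComma rest <;> simp

lemma bLoop_mGo (p : List Char) (ps : List (List Char)) (row : List String)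
    (field : Option (List Char)) (odd : Bool) (h : odd = field.isSome) :
    bPost (bLoop (p :: ps) (row, field, odd)) = mGo (p :: ps) row (bRepr field) odd := by
  induction ps generalizing p row field odd with
  | nil =>
    cases field <;> simp only [Option.isSome] at h <;> subst h <;>
      cases hodd : List.count '"' p % 2 == 1 <;>
      simp [bLoop, mGo, hodd, bPost, bRepr, List.append_assoc]
  | cons q qs ih =>
    cases field <;> simp only [Option.isSome] at h <;> subst h <;>
      cases hodd : List.count '"' p % 2 == 1
    · simpa [bLoop, mGo, hodd, bRepr] using ih q (row ++ [String.mk p]) none false rfl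
    · simpa [bLoop, mGo, hodd, bRepr] using ih q row (some p) true rfl
    all_goals rename_i f
    · simpa [bLoop, mGo, hodd, bRepr, List.append_assoc] using
        ih q row (some (f ++ ',' :: p)) true rfl
    · simpa [bLoop, mGo, hodd, bRepr, List.append_assoc] using
        ih q (row ++ [String.mk (f ++ ',' :: p)]) none false rfl

lemma aFold_mGo (cs : List Char) (row : List String) (field : List Char) (quote : Bool) :
    (let st := cs.foldl aStep (row, field, quote); st.1 ++ [String.mk st.2.1]) =
      mGo (pySplitComma cs) row field quote := by
  induction cs generalizing row field quote with
  | nil => simp [pySplitComma, mGo]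
  | cons c rest ih =>
    by_cases hc : c = ','
    · subst hc
      obtain ⟨q, qs, hq⟩ : ∃ q qs, pySplitComma rest = q :: qs := by
        cases h : pySplitComma rest with
        | nil => exact absurd h (pySplitComma_ne_nil rest)
        | cons q qs => exact ⟨q, qs, rfl⟩
      cases quote
      · simpa [pySplitComma, mGo, aStep, hq] using ih (row ++ [String.mk field]) [] false
      · simpa [pySplitComma, mGo, aStep, hq] using ih row (field ++ [',']) true
    · -- non-comma character: it is prepended to the first part
      cases h : pySplitComma rest with
      | nil => exact absurd h (pySplitComma_ne_nil rest)
      | cons p ps =>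
        have hq : xor quote ((c :: p).count '"' % 2 == 1) =
            xor (xor quote (c = '"')) (p.count '"' % 2 == 1) := by
          by_cases hcq : c = '"' <;>
            simp [hcq, Nat.add_mod] <;>
            cases hpar : p.count '"' % 2 == 1 <;> simp_all
        have hstep : rest.foldl aStep (aStep (row, field, quote) c) =
            rest.foldl aStep (row, field ++ [c], xor quote (c = '"')) := by
          by_cases hcq : c = '"' <;> simp [aStep, hc, hcq] <;> cases quote <;> simp
        have ihx := ih row (field ++ [c]) (xor quote (c = '"'))
        rw [h] at ihx
        cases ps with
        | nil =>
          simp only [List.foldl_cons, hstep, ihx, pySplitComma, if_neg hc, h, mGo]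
          simp
        | cons r rs =>
          simp only [List.foldl_cons, hstep, ihx, pySplitComma, if_neg hc, h, mGo]
          by_cases hcq : c = '"' <;> cases quote <;>
            cases hpar : List.count '"' p % 2 == 1 <;>
            simp_all [List.append_assoc, Nat.add_mod, List.count_cons]

-- ===== VERDICT (by name: the statement is the Claim_ definition above) =====
theorem split_fields_spec : Claim_equal_split_fields := by
  intro data _
  unfold Spec_split_fields split_fields split_fields_alt
  rw [aFold_mGo]
  obtain ⟨q, qs, hq⟩ : ∃ q qs, pySplitComma data.toList = q :: qs := by
    cases h : pySplitComma data.toList with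
    | nil => exact absurd h (pySplitComma_ne_nil data.toList)
    | cons q qs => exact ⟨q, qs, rfl⟩
  rw [hq]
  have h2 := bLoop_mGo q qs [] none false rfl
  simp only [bRepr] at h2
  rw [← h2]
  rfl
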